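-- pv_equiv track=rewrite | github.com/jeffreyhodes/RomanNumeralAnalyzer | mutils.py | add_slashes
-- ===== SOURCE A (Python) =====
-- def add_slashes(s):
--   result = []
--   nums = '1234567890'
--   for i in range(len(s)):
--     result.append(s[i])
--     if i < len(s) - 1 and s[i] in nums and s[i + 1] in nums:
--       result.append('/')
--   return ''.join(result)
-- ===== SOURCE B (Python) =====
-- def add_slashes(s):
--   out = []
--   i = 0
--   n = len(s)
--   while i < n:
--     if s[i] in '1234567890':
--       j = i + 1
--       while j < n and s[j] in '1234567890':
--         j += 1
--       out.append('/'.join(s[i:j]))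
--       i = j
--     else:
--       out.append(s[i])
--       i += 1
--   return ''.join(out)
-- ===== Notes on version B (the rewrite author's own statement) =====
-- stated objective: alternative
-- what changed: Instead of a per-character pass that peeks at the next character, B scans the string as maximal runs: each maximal run of digits is emitted as '/'.join(run) in one step and non-digit characters verbatim, so the separator logic lives in the join, not in a lookahead test.
import Mathlib
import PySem

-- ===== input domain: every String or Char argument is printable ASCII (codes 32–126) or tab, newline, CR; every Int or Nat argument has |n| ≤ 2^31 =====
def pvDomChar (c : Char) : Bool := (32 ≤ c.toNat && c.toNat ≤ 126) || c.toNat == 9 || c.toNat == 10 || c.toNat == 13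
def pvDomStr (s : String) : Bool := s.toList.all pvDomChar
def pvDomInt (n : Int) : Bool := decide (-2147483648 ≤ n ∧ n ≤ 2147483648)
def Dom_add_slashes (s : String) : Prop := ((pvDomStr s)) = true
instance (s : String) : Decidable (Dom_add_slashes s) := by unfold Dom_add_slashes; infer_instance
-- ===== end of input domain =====

-- B re-does the task as a run scanner: each maximal digit run is emitted as '/'.join(run), other characters verbatim; same O(n) cost, different traversal.

-- ===== PORT A =====
-- index loop: for each i, append s[i], then '/' when s[i] and s[i+1] are both in the digit string
def add_slashes (s : String) : String :=
  let cs := s.toList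
  let nums := "1234567890".toList
  String.ofList ((List.range cs.length).foldl (fun result i =>
    let result := result ++ [cs.getD i ' ']
    if i < cs.length - 1 ∧ cs.getD i ' ' ∈ nums ∧ cs.getD (i + 1) ' ' ∈ nums then
      result ++ ['/']
    else result) [])

-- ===== PORT B =====
-- B's digit test: c in '1234567890'
def isDigB (c : Char) : Bool := decide (c ∈ "1234567890".toList)

-- B's outer while loop: on a digit, the inner while advances j to the end of the
-- digit run (takeWhile/dropWhile) and '/'.join(s[i:j]) is appended (intersperse);
-- otherwise the single character is appended
def goB : List Char → List Char
  | [] => []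
  | c :: rest =>
    if isDigB c then
      List.intersperse '/' (c :: rest.takeWhile isDigB) ++ goB (rest.dropWhile isDigB)
    else
      c :: goB rest
termination_by cs => cs.length
decreasing_by
  · simpa [Nat.lt_succ_iff] using List.length_dropWhile_le isDigB rest
  · simp

def add_slashes_alt (s : String) : String := String.ofList (goB s.toList)

-- ===== PRECONDITION & SPEC =====
def Spec_add_slashes (s : String) (out : String) : Prop := out = add_slashes_alt s
instance (s : String) (out : String) : Decidable (Spec_add_slashes s out) := by unfold Spec_add_slashes; infer_instance

-- ===== CLAIM (what is proved, stated in full; the proofs are below) =====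
def Claim_equal_add_slashes : Prop := ∀ (s : String), Dom_add_slashes s → Spec_add_slashes s (add_slashes s)

-- ===== LEMMAS AND PROOFS =====

-- common reference form: pairwise recursion inserting '/' between adjacent digits
def pw : List Char → List Char
  | [] => []
  | [c] => [c]
  | a :: b :: t =>
    if isDigB a ∧ isDigB b then a :: '/' :: pw (b :: t) else a :: pw (b :: t)

-- A's loop body as a segment function
def segA (cs : List Char) (i : Nat) : List Char :=
  cs.getD i ' ' ::
    (if i < cs.length - 1 ∧ isDigB (cs.getD i ' ') ∧ isDigB (cs.getD (i + 1) ' ')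
     then ['/'] else [])

-- A's index-based segments flatten to the pairwise form
theorem core (cs : List Char) : (List.range cs.length).flatMap (segA cs) = pw cs := by
  induction cs with
  | nil => simp [pw]
  | cons c rest ih =>
    have hshift : (fun i => segA (c :: rest) (i + 1)) = segA rest := by
      funext i
      simp only [segA, List.getD_cons_succ, List.length_cons]
      split_ifs with h1 h2 h2
      · rfl
      · exact absurd ⟨by omega, h1.2⟩ h2
      · exact absurd ⟨by omega, h2.2⟩ h1
      · rfl
    have hrange : List.range ((c :: rest).length)
        = 0 :: (List.range rest.length).map (· + 1) := by
      simp [List.range_succ_eq_map]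
    calc (List.range (c :: rest).length).flatMap (segA (c :: rest))
        = segA (c :: rest) 0 ++ (List.range rest.length).flatMap (fun i => segA (c :: rest) (i + 1)) := by
          rw [hrange]; simp [List.flatMap_cons, List.flatMap_map]
      _ = segA (c :: rest) 0 ++ (List.range rest.length).flatMap (segA rest) := by rw [hshift]
      _ = pw (c :: rest) := by
          rw [ih]
          cases rest with
          | nil => simp [segA, pw]
          | cons b t =>
            simp only [segA, pw, List.getD_cons_zero, List.getD_cons_succ, List.length_cons]
            split_ifs with h1 h2 h2 <;> simp_all

-- B's run scanner equals the pairwise form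
theorem goB_eq_pw (cs : List Char) : goB cs = pw cs := by
  induction cs with
  | nil => simp [goB, pw]
  | cons c rest ih =>
    by_cases hc : isDigB c
    · cases rest with
      | nil => simp [goB, pw, hc]
      | cons b t =>
        by_cases hb : isDigB b
        · have hgb : goB (b :: t) =
              List.intersperse '/' (b :: t.takeWhile isDigB) ++ goB (t.dropWhile isDigB) := by
            rw [goB]; simp [hb]
          rw [goB, pw]
          simp only [hc, hb, and_self, if_true, List.takeWhile_cons, List.dropWhile_cons]
          rw [← ih, hgb]
          simp [List.intersperse]
        · rw [goB, pw]
          simp only [hc, hb, List.takeWhile_cons, List.dropWhile_cons, if_true,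
            Bool.false_eq_true, and_false, if_false]
          simp [ih, List.intersperse]
    · cases rest with
      | nil => simp [goB, pw, hc]
      | cons b t =>
        rw [goB]; rw [pw]
        simp [hc, ih]

theorem add_slashes_eq (s : String) : add_slashes s = add_slashes_alt s := by
  unfold add_slashes add_slashes_alt
  have hf : (fun (result : List Char) (i : Nat) =>
      let result := result ++ [s.toList.getD i ' ']
      if i < s.toList.length - 1 ∧ s.toList.getD i ' ' ∈ "1234567890".toList ∧
          s.toList.getD (i + 1) ' ' ∈ "1234567890".toList then
        result ++ ['/'] else result)
      = fun result i => result ++ segA s.toList i := by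
    funext result i
    simp only [segA, isDigB, decide_eq_true_iff]
    split_ifs <;> simp
  simp only []
  rw [hf, PySem.List.foldl_append_eq_flatMap, core, goB_eq_pw]
  simp

-- ===== VERDICT (by name: the statement is the Claim_ definition above) =====
theorem add_slashes_spec : Claim_equal_add_slashes := by
  intro s _
  unfold Spec_add_slashes
  exact add_slashes_eq s
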